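-- pv_equiv track=rewrite | github.com/qbnr7/nlstats2 | 04_generate_reports.py | sidenav_html
-- ===== SOURCE A (Python) =====
-- def sidenav_html(sections):
--     """sections = list of (anchor, icon, label)"""
--     html  = '<nav class="sidenav">'
--     for i, (anchor, icon, label) in enumerate(sections):
--         if i and i % 4 == 0:
--             html += '<div class="nav-divider"></div>'
--         html += (f'<a href="#{anchor}">'
--                  f'<span class="nav-icon">{icon}</span>'
--                  f'<span class="nav-label">{label}</span>'
--                  f'</a>')
--     html += '</nav>'
--     return html
-- ===== SOURCE B (Python) =====
-- def sidenav_html(sections):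
--     """sections = list of (anchor, icon, label)"""
--     def render(sec):
--         anchor, icon, label = sec
--         return (f'<a href="#{anchor}">'
--                 f'<span class="nav-icon">{icon}</span>'
--                 f'<span class="nav-label">{label}</span>'
--                 f'</a>')
--     chunks = []
--     rest = sections
--     while rest:
--         chunks.append(rest[:4])
--         rest = rest[4:]
--     body = '<div class="nav-divider"></div>'.join(
--         ''.join(render(sec) for sec in chunk) for chunk in chunks)
--     return f'<nav class="sidenav">{body}</nav>'
-- ===== Notes on version B (the rewrite author's own statement) =====
-- stated objective: alternative
-- what changed: B replaces A's single indexed loop with its i%4 running-index divider test by chunking the sections into consecutive groups of four, rendering each group with str.join and joining the groups with the divider string, so no index arithmetic remains.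
import Mathlib
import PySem

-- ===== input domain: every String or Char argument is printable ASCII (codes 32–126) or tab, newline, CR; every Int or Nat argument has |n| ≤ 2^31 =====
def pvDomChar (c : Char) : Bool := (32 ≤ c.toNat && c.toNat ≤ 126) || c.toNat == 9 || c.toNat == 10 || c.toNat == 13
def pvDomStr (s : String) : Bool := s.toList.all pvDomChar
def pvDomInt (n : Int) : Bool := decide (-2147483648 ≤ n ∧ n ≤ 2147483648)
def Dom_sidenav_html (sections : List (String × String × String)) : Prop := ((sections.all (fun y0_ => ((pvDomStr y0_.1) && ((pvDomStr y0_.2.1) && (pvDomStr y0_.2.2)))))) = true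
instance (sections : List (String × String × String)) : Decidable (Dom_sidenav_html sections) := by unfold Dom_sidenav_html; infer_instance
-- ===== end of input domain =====

-- B builds the sidenav by chunking the sections into groups of four and joining the
-- rendered groups with the divider, instead of A's indexed loop with an i%4 test
-- (objective: alternative decomposition, same cost).

-- ===== PORT A =====
def sidenav_html (sections : List (String × String × String)) : String :=
  let html := "<nav class=\"sidenav\">"
  let html := (PySem.List.enumerate sections).foldl (fun html p =>
      (if p.1 ≠ 0 ∧ PySem.Int.mod p.1 4 = 0 then html ++ "<div class=\"nav-divider\"></div>" else html)
      ++ ("<a href=\"#" ++ p.2.1 ++ "\"><span class=\"nav-icon\">" ++ p.2.2.1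
          ++ "</span><span class=\"nav-label\">" ++ p.2.2.2 ++ "</span></a>")) html
  html ++ "</nav>"

-- ===== PORT B =====
def pvRender (sec : String × String × String) : String :=
  "<a href=\"#" ++ sec.1 ++ "\"><span class=\"nav-icon\">" ++ sec.2.1
  ++ "</span><span class=\"nav-label\">" ++ sec.2.2 ++ "</span></a>"

-- the while-loop in Source B that slices off rest[:4] / rest[4:]
def pvChunks : List (String × String × String) → List (List (String × String × String))
  | [] => []
  | x :: r => ((x :: r).take 4) :: pvChunks ((x :: r).drop 4)
termination_by xs => xs.length
decreasing_by simp

def sidenav_html_alt (sections : List (String × String × String)) : String :=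
  let body := PySem.Str.join "<div class=\"nav-divider\"></div>"
      ((pvChunks sections).map (fun chunk => PySem.Str.join "" (chunk.map pvRender)))
  "<nav class=\"sidenav\">" ++ body ++ "</nav>"

-- ===== PRECONDITION & SPEC =====
def Spec_sidenav_html (sections : List (String × String × String)) (out : String) : Prop := out = sidenav_html_alt sections
instance (sections : List (String × String × String)) (out : String) : Decidable (Spec_sidenav_html sections out) := by unfold Spec_sidenav_html; infer_instance

-- ===== CLAIM (what is proved, stated in full; the proofs are below) =====
def Claim_equal_sidenav_html : Prop := ∀ (sections : List (String × String × String)), Dom_sidenav_html sections → Spec_sidenav_html sections (sidenav_html sections)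

-- ===== LEMMAS AND PROOFS =====

-- A's loop body, index-aware, as a structural recursion (proof helper only)
def pvGA : Int → List (String × String × String) → String
  | _, [] => ""
  | k, x :: r =>
      (if k ≠ 0 ∧ PySem.Int.mod k 4 = 0 then "<div class=\"nav-divider\"></div>" else "")
      ++ pvRender x ++ pvGA (k + 1) r

theorem pvFoldA (xs : List (String × String × String)) : ∀ (k : Int) (acc : String),
    (PySem.List.enumerate xs k).foldl (fun html p =>
      (if p.1 ≠ 0 ∧ PySem.Int.mod p.1 4 = 0 then html ++ "<div class=\"nav-divider\"></div>" else html)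
      ++ ("<a href=\"#" ++ p.2.1 ++ "\"><span class=\"nav-icon\">" ++ p.2.2.1
          ++ "</span><span class=\"nav-label\">" ++ p.2.2.2 ++ "</span></a>")) acc
    = acc ++ pvGA k xs := by
  induction xs with
  | nil => intro k acc; simp [PySem.List.enumerate, pvGA]
  | cons x r ih =>
      intro k acc
      rw [PySem.List.enumerate_cons, List.foldl_cons, ih]
      have hcons : pvGA k (x :: r)
          = (if k ≠ 0 ∧ PySem.Int.mod k 4 = 0 then "<div class=\"nav-divider\"></div>" else "")
            ++ pvRender x ++ pvGA (k + 1) r := rfl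
      rw [hcons]
      split_ifs with h <;>
        simp only [pvRender, String.append_assoc, String.empty_append]

theorem pvGA_cons (k : Int) (x : String × String × String) (r : List (String × String × String)) :
    pvGA k (x :: r)
    = (if k ≠ 0 ∧ PySem.Int.mod k 4 = 0 then "<div class=\"nav-divider\"></div>" else "")
      ++ pvRender x ++ pvGA (k + 1) r := rfl

theorem pvGA_shift (r : List (String × String × String)) : ∀ (k : Int), 1 ≤ k →
    pvGA (k + 4) r = pvGA k r := by
  induction r with
  | nil => intro k _; rfl
  | cons y t ih =>
      intro k hk
      unfold pvGA
      have hm : PySem.Int.mod (k + 4) 4 = PySem.Int.mod k 4 := by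
        simp [PySem.Int.mod]
      have h4 : (k + 4 ≠ 0 ∧ PySem.Int.mod (k + 4) 4 = 0) ↔ (k ≠ 0 ∧ PySem.Int.mod k 4 = 0) := by
        rw [hm]; constructor <;> rintro ⟨h1, h2⟩ <;> exact ⟨by omega, h2⟩
      rw [if_congr h4 rfl rfl]
      have : k + 4 + 1 = (k + 1) + 4 := by ring
      rw [this, ih (k + 1) (by omega)]

theorem pvGA_four (r : List (String × String × String)) :
    pvGA 4 r = (match r with
      | [] => ""
      | _ :: _ => "<div class=\"nav-divider\"></div>" ++ pvGA 0 r) := by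
  cases r with
  | nil => rfl
  | cons y t =>
      show pvGA 4 (y :: t) = _
      unfold pvGA
      have h5 : (4 : Int) + 1 = 1 + 4 := by ring
      rw [h5, pvGA_shift t 1 (by norm_num)]
      simp [String.append_assoc, String.empty_append]

-- PySem.Str.join at the String level
theorem pvJoin_nil (sep : String) : PySem.Str.join sep [] = "" := by
  apply String.toList_inj.mp
  simp [PySem.Str.join, PySem.Chars.join_nil]

theorem pvJoin_singleton (sep p : String) : PySem.Str.join sep [p] = p := by
  apply String.toList_inj.mp
  simp [PySem.Str.join, PySem.Chars.join_singleton]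

theorem pvJoin_cons_cons (sep p q : String) (rest : List String) :
    PySem.Str.join sep (p :: q :: rest) = p ++ sep ++ PySem.Str.join sep (q :: rest) := by
  apply String.toList_inj.mp
  simp [PySem.Str.join, PySem.Chars.join_cons_cons]

theorem pvJoinE_cons (p : String) (l : List String) :
    PySem.Str.join "" (p :: l) = p ++ PySem.Str.join "" l := by
  cases l with
  | nil => rw [pvJoin_singleton, pvJoin_nil, String.append_empty]
  | cons q rest => rw [pvJoin_cons_cons, String.append_empty]

theorem pvMain (xs : List (String × String × String)) :
    pvGA 0 xs = PySem.Str.join "<div class=\"nav-divider\"></div>"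
      ((pvChunks xs).map (fun chunk => PySem.Str.join "" (chunk.map pvRender))) := by
  induction xs using pvChunks.induct with
  | case1 => simp [pvGA, pvChunks, pvJoin_nil]
  | case2 x r ih =>
      match r with
      | [] =>
          simp [pvChunks, pvGA, pvJoin_singleton, String.append_empty, String.empty_append]
      | [b] =>
          simp [pvChunks, pvGA, pvJoin_singleton, pvJoinE_cons, String.append_empty,
                String.empty_append, PySem.Int.mod]
      | [b, c] =>
          simp [pvChunks, pvGA, pvJoin_singleton, pvJoinE_cons, String.append_empty,
                String.empty_append, PySem.Int.mod]
      | [b, c, d] =>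
          simp [pvChunks, pvGA, pvJoin_singleton, pvJoinE_cons, String.append_empty,
                String.empty_append, PySem.Int.mod]
      | b :: c :: d :: e :: rest =>
          have hdrop : (x :: b :: c :: d :: e :: rest).drop 4 = e :: rest := rfl
          rw [hdrop] at ih
          have m1 : PySem.Int.mod (1 : Int) 4 = 1 := by decide
          have m2 : PySem.Int.mod (2 : Int) 4 = 2 := by decide
          have m3 : PySem.Int.mod (3 : Int) 4 = 3 := by decide
          have hGA : pvGA 0 (x :: b :: c :: d :: e :: rest)
              = pvRender x ++ (pvRender b ++ (pvRender c ++ (pvRender d ++ pvGA 4 (e :: rest)))) := by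
            rw [pvGA_cons, pvGA_cons, pvGA_cons, pvGA_cons]
            norm_num [m1, m2, m3, String.empty_append]
          rw [hGA, pvGA_four, ih]
          cases rest with
          | nil =>
              simp [pvChunks, pvJoin_singleton, pvJoin_cons_cons, String.append_empty,
                    String.append_assoc]
          | cons f t =>
              have hc : pvChunks (e :: f :: t) = ((e :: f :: t).take 4) :: pvChunks ((e :: f :: t).drop 4) := by
                rw [pvChunks]
              rw [show pvChunks (x :: b :: c :: d :: e :: f :: t)
                    = [x, b, c, d] :: pvChunks (e :: f :: t) from by rw [pvChunks]; rfl, hc]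
              simp only [List.map_cons, List.map_nil, pvJoin_cons_cons, pvJoinE_cons, pvJoin_nil,
                         String.append_empty, String.append_assoc]

-- ===== VERDICT (by name: the statement is the Claim_ definition above) =====
theorem sidenav_html_spec : Claim_equal_sidenav_html := by
  intro sections _
  show sidenav_html sections = sidenav_html_alt sections
  unfold sidenav_html sidenav_html_alt
  simp only []
  rw [pvFoldA, pvMain, String.append_assoc]
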